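-- pv_equiv track=rewrite | github.com/remekozicki/ASD | kolokwium_1/kol1_v1.py | bucket
-- ===== SOURCE A (Python) =====
-- def get_max_min(T):
--     min_val = float('inf')
--     max_val = 0
--     for i in range(len(T)):
--         if len(T[i]) > max_val:
--             max_val = len(T[i])
--         if len(T[i]) < min_val:
--             min_val = len(T[i])
--     return min_val, max_val
--
-- def bucket(T):
--     n = len(T)
--     min_val, max_val = get_max_min(T)
--     diff = max_val - min_val
--
--     B = [[] for _ in range(diff+1)]
--
--     for i in range(n):
--         index = int(len(T[i]) - min_val)
--         B[index].append(T[i])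
--
--     max_strong = 0
--
--     for i in range(len(B)):
--         compare= find_max_strong(B[i])
--         if max_strong < compare:
--             max_strong = compare
--
--
--     return max_strong +1
--
-- def find_max_strong(T):
--     n = len(T)
--     strong_max = 0
--
--     for i in range(n):
--         if T[i] == 0:
--             continue
--         strong_tmp = 0
--         for j in range(n):
--             if i == j or T[j] == 0:
--                 continue
--             if  T[i] == T[j]:
--                 strong_tmp += 1
--                 T[j] = 0
--             elif T[i] == T[j][::-1]:
--                 strong_tmp += 1
--                 T[j] = 0
--
--         if strong_max < strong_tmp:
--             strong_max = strong_tmp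
--         T[i] = 0
--
--     return strong_max
-- ===== SOURCE B (Python) =====
-- def bucket(T):
--     counts = {}
--     for s in T:
--         r = s[::-1]
--         k = s if s <= r else r
--         counts[k] = counts.get(k, 0) + 1
--     return max(counts.values())
-- ===== Notes on version B (the rewrite author's own statement) =====
-- stated objective: faster
-- what changed: Replaces the length-bucketing plus quadratic mutate-and-scan grouping with a single pass that counts frequencies of the canonical key min(s, s[::-1]) in a dict and returns the maximum count.
import Mathlib
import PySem

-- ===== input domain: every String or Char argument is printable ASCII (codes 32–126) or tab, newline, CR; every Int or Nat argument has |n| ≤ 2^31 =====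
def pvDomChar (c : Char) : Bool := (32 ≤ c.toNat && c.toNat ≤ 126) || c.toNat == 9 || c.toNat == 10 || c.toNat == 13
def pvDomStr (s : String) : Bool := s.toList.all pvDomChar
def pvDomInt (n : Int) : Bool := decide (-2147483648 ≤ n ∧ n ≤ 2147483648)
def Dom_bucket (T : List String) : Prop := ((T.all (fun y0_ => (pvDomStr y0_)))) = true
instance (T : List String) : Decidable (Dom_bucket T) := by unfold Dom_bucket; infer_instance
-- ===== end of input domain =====

-- B replaces A's length-bucketing plus quadratic mutate-and-scan grouping by a single counting
-- pass over canonical keys min(s, s[::-1]); equivalence is proved for nonempty input (A raises on []).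

-- ===== PORT A =====
-- helper get_max_min: Python's float('inf') initial minimum is modelled as `none`
-- (every length compares below it); the final minimum on nonempty input is an int.
def get_max_min (T : List String) : Option Int × Int :=
  T.foldl (fun st s =>
    let l := PySem.Str.len s
    let mx := if st.2 < l then l else st.2
    let mn := match st.1 with
      | none => some l
      | some m => if l < m then some l else some m
    (mn, mx)) (none, 0)

-- inner loop body of find_max_strong (`for j in range(n)`); zeroed cells T[j] = 0 are `none`
def pvInnerStep (s : String) (i : Nat) (st : Int × List (Option String)) (j : Nat) :
    Int × List (Option String) :=
  if i = j then st
  else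
    match st.2.getD j none with
    | none => st
    | some t =>
      if s = t then (st.1 + 1, st.2.set j none)                                    -- T[i] == T[j]
      else if s = String.ofList t.toList.reverse then (st.1 + 1, st.2.set j none)  -- T[i] == T[j][::-1]
      else st

-- outer loop body of find_max_strong (`for i in range(n)`)
def pvOuterStep (n : Nat) (st : Int × List (Option String)) (i : Nat) :
    Int × List (Option String) :=
  match st.2.getD i none with
  | none => st                                   -- if T[i] == 0: continue
  | some s =>
    let inner := (List.range n).foldl (pvInnerStep s i) (0, st.2)
    let sm := if st.1 < inner.1 then inner.1 else st.1
    (sm, inner.2.set i none)                     -- T[i] = 0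

def find_max_strong (L : List String) : Int :=
  ((List.range L.length).foldl (pvOuterStep L.length) (0, L.map some)).1

-- bucket-filling step: B[index].append(T[i]); index = len(T[i]) - min_val is provably
-- in [0, diff] on every input A accepts, so the in-range `set`/`getD` are exact
def pvBStep (mn : Int) (B : List (List String)) (s : String) : List (List String) :=
  let index := PySem.Str.len s - mn
  B.set index.toNat (B.getD index.toNat [] ++ [s])

def bucket (T : List String) : Int :=
  let mm := get_max_min T
  match mm.1 with
  | none => 0        -- unreachable under Pre_bucket: Python raises TypeError here (T = [])
  | some mn =>
    let diff := mm.2 - mn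
    let B0 : List (List String) := List.replicate (diff + 1).toNat []
    let B := T.foldl (pvBStep mn) B0
    let ms := B.foldl (fun ms b =>
      let compare := find_max_strong b
      if ms < compare then compare else ms) 0
    ms + 1

-- ===== PORT B =====
def bucket_alt (T : List String) : Int :=
  let counts := T.foldl (fun (d : PySem.Dict String Int) s =>
    let r := (PySem.Str.slice? s none none (-1)).getD s   -- r = s[::-1] (never raises: step ≠ 0)
    let k := if s.toList ≤ r.toList then s else r          -- k = s if s <= r else r (code-point order)
    d.insert k (d.getD k 0 + 1)) PySem.Dict.empty          -- counts[k] = counts.get(k, 0) + 1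
  match PySem.List.max? counts.values (fun v => v) with
  | none => 0        -- unreachable under Pre_bucket: Python max() raises ValueError here (T = [])
  | some v => v

-- ===== PRECONDITION & SPEC =====
-- Pre_ excludes only the empty list, on which A raises TypeError (range built from -inf) and B raises ValueError (max of empty).
def Pre_bucket (T : List String) : Prop := T ≠ []
instance (T : List String) : Decidable (Pre_bucket T) := by unfold Pre_bucket; infer_instance

def pvWitness_bucket : List String := (["ab", "ba", "cd"])

def Spec_bucket (T : List String) (out : Int) : Prop := out = bucket_alt T
instance (T : List String) (out : Int) : Decidable (Spec_bucket T out) := by unfold Spec_bucket; infer_instance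

-- ===== CLAIM (what is proved, stated in full; the proofs are below) =====
def Claim_equal_bucket : Prop := ∀ (T : List String), Dom_bucket T → Pre_bucket T → Spec_bucket T (bucket T)

-- ===== LEMMAS AND PROOFS =====

-- canonical representative of the class {s, reversed s}, and the canonical-key multiplicity
def pvRev (s : String) : String := String.ofList s.toList.reverse
def pvCf (s : String) : String := if s.toList ≤ s.toList.reverse then s else pvRev s
def pvCnt (T : List String) (c : String) : Int := ((T.map pvCf).count c : Int)
-- running max with base 0 (both programs' final loops compute one)
def pvMsup (l : List Int) : Int := l.foldl max 0
-- state of A's outer zeroing loop after i iterations: classes met before i are zeroed out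
def pvMask (L : List String) (i : Nat) : List (Option String) :=
  L.map (fun t => if pvCf t ∈ (L.take i).map pvCf then none else some t)
-- the Boolean test A's inner loop applies to cell j
def pvHit (s : String) (o : Option (Option String)) : Bool :=
  match o with
  | some (some t) => decide (s = t) || decide (s = String.ofList t.toList.reverse)
  | _ => false
-- A's running maximum after i outer iterations
def pvMi (L : List String) (i : Nat) : Int :=
  ((L.take i).map pvCf).foldl (fun acc c => max acc (pvCnt L c - 1)) 0

theorem toList_pvRev (s : String) : (pvRev s).toList = s.toList.reverse := by
  simp [pvRev]

theorem length_pvCf (s : String) : (pvCf s).length = s.length := by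
  unfold pvCf pvRev
  split <;> simp [String.length_ofList, String.length_toList]

theorem pvClA (a b : List Char) (h : a = b.reverse) :
    (if a ≤ a.reverse then a else a.reverse) = (if b ≤ b.reverse then b else b.reverse) := by
  subst h
  rcases le_total b b.reverse with hb | hb
  · by_cases hb' : b.reverse ≤ b
    · have : b = b.reverse := le_antisymm hb hb'
      simp [← this]
    · simp [List.reverse_reverse, hb, hb']
  · by_cases hb' : b ≤ b.reverse
    · have : b = b.reverse := le_antisymm hb' hb
      simp [← this]
    · simp [List.reverse_reverse, hb, hb']

theorem pvCl_mem (a : List Char) :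
    (if a ≤ a.reverse then a else a.reverse) = a ∨ (if a ≤ a.reverse then a else a.reverse) = a.reverse := by
  split <;> simp

theorem toList_pvCf (s : String) :
    (pvCf s).toList = (if s.toList ≤ s.toList.reverse then s.toList else s.toList.reverse) := by
  unfold pvCf; split <;> simp [toList_pvRev]

theorem eq_pvRev_iff (s t : String) : s = pvRev t ↔ s.toList = t.toList.reverse := by
  rw [← String.toList_inj, toList_pvRev]

theorem pvCf_eq_iff (s t : String) : pvCf s = pvCf t ↔ (s = t ∨ s = pvRev t) := by
  constructor
  · intro h0
    have h : (if s.toList ≤ s.toList.reverse then s.toList else s.toList.reverse)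
        = (if t.toList ≤ t.toList.reverse then t.toList else t.toList.reverse) := by
      rw [← toList_pvCf, ← toList_pvCf, h0]
    rcases pvCl_mem s.toList with ha | ha <;> rcases pvCl_mem t.toList with hb | hb
    · exact Or.inl (String.toList_inj.mp (ha.symm.trans (h.trans hb)))
    · exact Or.inr ((eq_pvRev_iff s t).mpr (ha.symm.trans (h.trans hb)))
    · refine Or.inr ((eq_pvRev_iff s t).mpr ?_)
      have h2 := ha.symm.trans (h.trans hb)
      rw [← h2, List.reverse_reverse]
    · exact Or.inl (String.toList_inj.mp
        (List.reverse_injective (ha.symm.trans (h.trans hb))))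
  · rintro (h | h)
    · subst h; rfl
    · rw [← String.toList_inj, toList_pvCf, toList_pvCf]
      exact pvClA _ _ ((eq_pvRev_iff s t).mp h)

theorem le_pvMsup {x : Int} {l : List Int} (h : x ∈ l) : x ≤ pvMsup l :=
  (PySem.List.le_foldl_max l 0).2 x h

theorem pvMsup_nonneg (l : List Int) : 0 ≤ pvMsup l := (PySem.List.le_foldl_max l 0).1

theorem pvMsup_le {l : List Int} {z : Int} (h0 : 0 ≤ z) (h : ∀ x ∈ l, x ≤ z) :
    pvMsup l ≤ z := by
  rcases PySem.List.foldl_max_mem l 0 with h1 | h1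
  · rw [pvMsup, h1]; exact h0
  · exact h _ h1

-- length and membership of the mask, and the value of its cells
theorem pvMask_length (L : List String) (i : Nat) : (pvMask L i).length = L.length := by
  simp [pvMask]

theorem pvMask_getElem? (L : List String) (i j : Nat) (hj : j < L.length) :
    (pvMask L i)[j]? = some (if pvCf L[j] ∈ (L.take i).map pvCf then none else some L[j]) := by
  simp [pvMask, List.getElem?_map, List.getElem?_eq_getElem hj]

theorem pvHit_some (s t : String) : pvHit s (some (some t)) = (pvCf t == pvCf s) := by
  show (decide (s = t) || decide (s = String.ofList t.toList.reverse)) = (pvCf t == pvCf s)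
  by_cases h : pvCf s = pvCf t
  · rcases (pvCf_eq_iff s t).mp h with h1 | h1 <;> simp [h1, pvRev, h.symm]
  · have h1 : ¬ s = t := fun hc => h ((pvCf_eq_iff s t).mpr (Or.inl hc))
    have h2 : ¬ s = String.ofList t.toList.reverse :=
      fun hc => h ((pvCf_eq_iff s t).mpr (Or.inr hc))
    simp [h1, h2]
    exact fun hc => h hc.symm

-- inner loop of find_max_strong: counts and zeroes exactly the matching live cells j ≠ i
theorem inner_spec (s : String) (i : Nat) (arr : List (Option String)) (m : Nat)
    (hm : m ≤ arr.length) :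
    ((List.range m).foldl (pvInnerStep s i) (0, arr)).1
      = ((List.range m).countP (fun j => !(j == i) && pvHit s arr[j]?) : Int)
  ∧ ((List.range m).foldl (pvInnerStep s i) (0, arr)).2.length = arr.length
  ∧ ∀ k : Nat, ((List.range m).foldl (pvInnerStep s i) (0, arr)).2[k]?
      = if k < m ∧ k ≠ i ∧ pvHit s arr[k]? then some none else arr[k]? := by
  induction m with
  | zero => simp
  | succ m ih =>
    have hm' : m ≤ arr.length := Nat.le_of_succ_le hm
    obtain ⟨ih1, ih2, ih3⟩ := ih hm'
    set prev := (List.range m).foldl (pvInnerStep s i) (0, arr) with hprev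
    have hstep : (List.range (m+1)).foldl (pvInnerStep s i) (0, arr) = pvInnerStep s i prev m := by
      rw [List.range_succ, List.foldl_append, List.foldl_cons, List.foldl_nil]
    have hcnt : (List.range (m+1)).countP (fun j => !(j == i) && pvHit s arr[j]?)
        = (List.range m).countP (fun j => !(j == i) && pvHit s arr[j]?)
          + (if !(m == i) && pvHit s arr[m]? then 1 else 0) := by
      rw [List.range_succ, List.countP_append]
      simp [List.countP_cons]
    -- the cell the step reads is the original cell
    have hgetm : prev.2.getD m none = (arr[m]?).getD none := by
      rw [List.getD_eq_getElem?_getD, ih3 m]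
      simp
    have hmlt : m < arr.length := hm
    obtain ⟨v, hv⟩ : ∃ v, arr[m]? = some v := ⟨arr[m], List.getElem?_eq_getElem hmlt⟩
    by_cases hi : i = m
    · -- j = i: continue
      have hse : pvInnerStep s i prev m = prev := by simp [pvInnerStep, hi]
      rw [hstep, hse, hcnt]
      have hmi : (!(m == i)) = false := by simp [hi]
      rw [hmi]
      refine ⟨by simp [ih1], ih2, ?_⟩
      intro k
      rw [ih3 k]
      have : (k < m + 1 ∧ k ≠ i ∧ pvHit s arr[k]? = true)
          ↔ (k < m ∧ k ≠ i ∧ pvHit s arr[k]? = true) := by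
        constructor
        · rintro ⟨h1, h2, h3⟩; exact ⟨by omega, h2, h3⟩
        · rintro ⟨h1, h2, h3⟩; exact ⟨by omega, h2, h3⟩
      rw [if_congr this rfl rfl]
    · -- j ≠ i
      have hne : ¬ (i = m) := hi
      rw [hstep]
      have hread : prev.2.getD m none = v := by rw [hgetm, hv]; rfl
      cases v with
      | none =>
        have hstepeq : pvInnerStep s i prev m = prev := by
          unfold pvInnerStep
          rw [if_neg hne, hread]
        have hhit : pvHit s arr[m]? = false := by rw [hv]; rfl
        rw [hstepeq, hcnt, hhit]
        refine ⟨by simp [ih1], ih2, ?_⟩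
        intro k
        rw [ih3 k]
        by_cases hk : k = m
        · subst hk
          rw [hhit]
          simp
        · have : (k < m + 1 ∧ k ≠ i ∧ pvHit s arr[k]? = true)
              ↔ (k < m ∧ k ≠ i ∧ pvHit s arr[k]? = true) := by
            constructor
            · rintro ⟨h1, h2, h3⟩; exact ⟨by omega, h2, h3⟩
            · rintro ⟨h1, h2, h3⟩; exact ⟨by omega, h2, h3⟩
          rw [if_congr this rfl rfl]
      | some t =>
        have hhit : pvHit s arr[m]? = (decide (s = t) || decide (s = String.ofList t.toList.reverse)) := by
          rw [hv]; rfl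
        by_cases h1 : s = t
        · have hstepeq : pvInnerStep s i prev m = (prev.1 + 1, prev.2.set m none) := by
            unfold pvInnerStep
            rw [if_neg hne, hread]
            simp [h1]
          have hhit' : pvHit s arr[m]? = true := by rw [hhit]; simp [h1]
          rw [hstepeq, hcnt, hhit']
          refine ⟨?_, by simp [ih2], ?_⟩
          · simp [ih1]
            exact fun h => hne h.symm
          · intro k
            rw [List.getElem?_set]
            by_cases hk : m = k
            · subst hk
              rw [if_pos rfl, if_pos (by rw [ih2]; exact hmlt), if_pos ⟨by omega, fun hc => hne hc.symm, hhit'⟩]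
            · rw [if_neg hk, ih3 k]
              have : (k < m ∧ k ≠ i ∧ pvHit s arr[k]? = true)
                  ↔ (k < m + 1 ∧ k ≠ i ∧ pvHit s arr[k]? = true) := by
                constructor
                · rintro ⟨ha, hb, hc⟩; exact ⟨by omega, hb, hc⟩
                · rintro ⟨ha, hb, hc⟩; exact ⟨by omega, hb, hc⟩
              rw [if_congr this rfl rfl]
        · by_cases h2 : s = String.ofList t.toList.reverse
          · have hstepeq : pvInnerStep s i prev m = (prev.1 + 1, prev.2.set m none) := by
              unfold pvInnerStep
              rw [if_neg hne, hread]
              simp [h1, h2]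
            have hhit' : pvHit s arr[m]? = true := by rw [hhit]; simp [h2]
            rw [hstepeq, hcnt, hhit']
            refine ⟨?_, by simp [ih2], ?_⟩
            · simp [ih1]
              exact fun h => hne h.symm
            · intro k
              rw [List.getElem?_set]
              by_cases hk : m = k
              · subst hk
                rw [if_pos rfl, if_pos (by rw [ih2]; exact hmlt), if_pos ⟨by omega, fun hc => hne hc.symm, hhit'⟩]
              · rw [if_neg hk, ih3 k]
                have : (k < m ∧ k ≠ i ∧ pvHit s arr[k]? = true)
                    ↔ (k < m + 1 ∧ k ≠ i ∧ pvHit s arr[k]? = true) := by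
                  constructor
                  · rintro ⟨ha, hb, hc⟩; exact ⟨by omega, hb, hc⟩
                  · rintro ⟨ha, hb, hc⟩; exact ⟨by omega, hb, hc⟩
                rw [if_congr this rfl rfl]
          · have hstepeq : pvInnerStep s i prev m = prev := by
              unfold pvInnerStep
              rw [if_neg hne, hread]
              simp [h1, h2]
            have hhit' : pvHit s arr[m]? = false := by rw [hhit]; simp [h1, h2]
            rw [hstepeq, hcnt, hhit']
            refine ⟨by simp [ih1], ih2, ?_⟩
            intro k
            rw [ih3 k]
            by_cases hk : k = m
            · subst hk; rw [hhit']; simp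
            · have : (k < m + 1 ∧ k ≠ i ∧ pvHit s arr[k]? = true)
                  ↔ (k < m ∧ k ≠ i ∧ pvHit s arr[k]? = true) := by
                constructor
                · rintro ⟨ha, hb, hc⟩; exact ⟨by omega, hb, hc⟩
                · rintro ⟨ha, hb, hc⟩; exact ⟨by omega, hb, hc⟩
              rw [if_congr this rfl rfl]

theorem countP_range_getD (L : List String) (p : String → Bool) (d : String) :
    (List.range L.length).countP (fun j => p (L.getD j d)) = L.countP p := by
  induction L with
  | nil => simp
  | cons t M ih =>
    rw [List.length_cons, List.range_succ_eq_map, List.countP_cons, List.countP_map, List.countP_cons]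
    have hc : List.countP ((fun j => p ((t :: M).getD j d)) ∘ Nat.succ) (List.range M.length)
        = List.countP (fun j => p (M.getD j d)) (List.range M.length) := by
      apply List.countP_congr
      intro j _
      simp
    rw [hc, ih]
    simp

theorem countP_eq_single (l : List Nat) (hnd : l.Nodup) (i : Nat) (hi : i ∈ l) (q : Nat → Bool) :
    l.countP (fun j => (j == i) && q j) = if q i then 1 else 0 := by
  induction l with
  | nil => simp at hi
  | cons a l ih =>
    rw [List.countP_cons]
    rcases List.nodup_cons.mp hnd with ⟨ha, hl⟩
    by_cases hai : a = i
    · subst hai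
      have hz : l.countP (fun j => (j == a) && q j) = 0 := by
        apply List.countP_eq_zero.mpr
        intro j hj
        have : j ≠ a := fun h => ha (h ▸ hj)
        simp [this]
      rw [hz]
      simp
    · have hil : i ∈ l := by
        rcases List.mem_cons.mp hi with h | h
        · exact absurd h.symm hai
        · exact h
      rw [ih hl hil]
      simp [hai]

theorem countP_split (l : List Nat) (q : Nat → Bool) (i : Nat) :
    l.countP q = l.countP (fun j => (j == i) && q j) + l.countP (fun j => (!(j == i)) && q j) := by
  induction l with
  | nil => simp
  | cons a l ih =>
    simp only [List.countP_cons]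
    by_cases hai : a = i <;> by_cases hq : q a <;> simp [hai, hq] <;> omega

-- outer loop of find_max_strong: running max of (class size - 1), classes met so far zeroed
theorem outer_spec (L : List String) (i : Nat) (hi : i ≤ L.length) :
    (List.range i).foldl (pvOuterStep L.length) (0, L.map some) = (pvMi L i, pvMask L i) := by
  induction i with
  | zero =>
    have hm : pvMask L 0 = L.map some := by
      unfold pvMask
      apply List.map_congr_left
      intro t _
      simp
    simp [pvMi, hm]
  | succ i ih =>
    have hilt : i < L.length := hi
    rw [List.range_succ, List.foldl_append, List.foldl_cons, List.foldl_nil,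
      ih (Nat.le_of_lt hilt)]
    have htake : L.take (i+1) = L.take i ++ [L[i]] := List.take_succ_eq_append_getElem hilt
    have hKsucc : (L.take (i+1)).map pvCf = (L.take i).map pvCf ++ [pvCf L[i]] := by
      rw [htake, List.map_append, List.map_cons, List.map_nil]
    have hMisucc : pvMi L (i+1) = max (pvMi L i) (pvCnt L (pvCf L[i]) - 1) := by
      unfold pvMi
      rw [hKsucc, List.foldl_append, List.foldl_cons, List.foldl_nil]
    have hmaskget : (pvMask L i).getD i none
        = if pvCf L[i] ∈ (L.take i).map pvCf then none else some L[i] := by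
      rw [List.getD_eq_getElem?_getD, pvMask_getElem? L i i hilt]
      rfl
    by_cases hc : pvCf L[i] ∈ (L.take i).map pvCf
    · -- cell i is already zeroed: the step is a no-op
      have hstep : pvOuterStep L.length (pvMi L i, pvMask L i) i = (pvMi L i, pvMask L i) := by
        unfold pvOuterStep
        rw [hmaskget, if_pos hc]
      rw [hstep, hMisucc]
      have h1 : max (pvMi L i) (pvCnt L (pvCf L[i]) - 1) = pvMi L i := by
        apply max_eq_left
        exact (PySem.List.le_foldl_max_int ((L.take i).map pvCf)
          (fun c => pvCnt L c - 1) 0).2 _ hc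
      have h2 : pvMask L (i+1) = pvMask L i := by
        unfold pvMask
        apply List.map_congr_left
        intro t _
        rw [hKsucc]
        by_cases ht : pvCf t ∈ (L.take i).map pvCf
        · rw [if_pos (List.mem_append.mpr (Or.inl ht)), if_pos ht]
        · have hni : pvCf t ∉ (L.take i).map pvCf ++ [pvCf L[i]] := by
            intro hmem
            rcases List.mem_append.mp hmem with h | h
            · exact ht h
            · rw [List.mem_singleton] at h
              rw [h] at ht
              exact ht hc
          rw [if_neg hni, if_neg ht]
      rw [h1, h2]
    · -- cell i is live: the inner loop zeroes and counts the whole class of L[i]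
      set s := L[i] with hs
      have hstep0 : pvOuterStep L.length (pvMi L i, pvMask L i) i
          = (let inner := (List.range L.length).foldl (pvInnerStep s i) (0, pvMask L i)
             let sm := if pvMi L i < inner.1 then inner.1 else pvMi L i
             (sm, inner.2.set i none)) := by
        unfold pvOuterStep
        rw [hmaskget, if_neg hc]
      obtain ⟨h1, h2, h3⟩ := inner_spec s i (pvMask L i) L.length (le_of_eq (pvMask_length L i).symm)
      set inner := (List.range L.length).foldl (pvInnerStep s i) (0, pvMask L i) with hinner
      -- the counter: the inner loop counted all other members of the class of s
      have hqcong : ∀ j ∈ List.range L.length,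
          (!(j == i) && pvHit s (pvMask L i)[j]?)
          = (!(j == i) && (pvCf (L.getD j "") == pvCf s)) := by
        intro j hj
        have hjlt : j < L.length := List.mem_range.mp hj
        have hgd : L.getD j "" = L[j] := by
          rw [List.getD_eq_getElem?_getD, List.getElem?_eq_getElem hjlt]
          rfl
        rw [pvMask_getElem? L i j hjlt, hgd]
        by_cases hd : pvCf L[j] ∈ (L.take i).map pvCf
        · have hne : (pvCf L[j] == pvCf s) = false := by
            apply beq_eq_false_iff_ne.mpr
            intro hcc
            rw [hcc] at hd
            exact hc hd
          rw [if_pos hd, hne]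
          rfl
        · rw [if_neg hd, pvHit_some]
      have h1' : inner.1 = ((List.range L.length).countP
          (fun j => !(j == i) && (pvCf (L.getD j "") == pvCf s)) : Int) := by
        rw [h1]
        congr 1
        apply List.countP_congr
        intro j hj
        rw [hqcong j hj]
      have hqi : (pvCf (L.getD i "") == pvCf s) = true := by
        have : L.getD i "" = s := by
          rw [List.getD_eq_getElem?_getD, List.getElem?_eq_getElem hilt]
          rfl
        rw [this]
        exact beq_self_eq_true _
      have hsplit := countP_split (List.range L.length)
        (fun j => (pvCf (L.getD j "") == pvCf s)) i
      have hsingle := countP_eq_single (List.range L.length) (List.nodup_range)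
        i (List.mem_range.mpr hilt) (fun j => (pvCf (L.getD j "") == pvCf s))
      rw [hqi, if_pos rfl] at hsingle
      have hfull := countP_range_getD L (fun t => (pvCf t == pvCf s)) ""
      have hcount : L.countP (fun t => (pvCf t == pvCf s)) = (L.map pvCf).count (pvCf s) := by
        rw [List.count_eq_countP, List.countP_map]
        rfl
      -- combine: the inner counter is (class size - 1)
      have hcnt : inner.1 = pvCnt L (pvCf s) - 1 := by
        rw [h1']
        have : (List.range L.length).countP (fun j => !(j == i) && (pvCf (L.getD j "") == pvCf s))
            = (L.map pvCf).count (pvCf s) - 1 := by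
          omega
        rw [this]
        unfold pvCnt
        have hge : 1 ≤ (L.map pvCf).count (pvCf s) := by omega
        omega
      rw [hstep0]
      show (if pvMi L i < inner.1 then inner.1 else pvMi L i, inner.2.set i none)
        = (pvMi L (i+1), pvMask L (i+1))
      have hsm : (if pvMi L i < inner.1 then inner.1 else pvMi L i) = pvMi L (i+1) := by
        rw [hcnt, hMisucc]
        omega
      have hmask : inner.2.set i none = pvMask L (i+1) := by
        apply List.ext_getElem?
        intro k
        by_cases hk : k < L.length
        · rw [List.getElem?_set]
          have hrhs := pvMask_getElem? L (i+1) k hk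
          by_cases hik : i = k
          · subst hik
            rw [if_pos rfl, if_pos (by rw [h2, pvMask_length]; exact hilt)]
            rw [hrhs]
            have hmem : pvCf L[i] ∈ (L.take (i+1)).map pvCf := by
              rw [hKsucc]
              exact List.mem_append.mpr (Or.inr (List.mem_singleton.mpr rfl))
            rw [if_pos hmem]
          · rw [if_neg hik, h3 k, hrhs]
            have hlhs := pvMask_getElem? L i k hk
            by_cases hd : pvCf L[k] ∈ (L.take i).map pvCf
            · -- already zeroed: stays zeroed
              have hhit : pvHit s (pvMask L i)[k]? = false := by
                rw [hlhs, if_pos hd]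
                rfl
              rw [hhit]
              have hin : pvCf L[k] ∈ (L.take (i+1)).map pvCf := by
                rw [hKsucc]; exact List.mem_append.mpr (Or.inl hd)
              simp only [hin, if_pos, Bool.false_eq_true, and_false, if_false, hlhs, if_pos hd]
            · have hhit : pvHit s (pvMask L i)[k]? = (pvCf L[k] == pvCf s) := by
                rw [hlhs, if_neg hd, pvHit_some]
              rw [hhit]
              by_cases heq : pvCf L[k] = pvCf s
              · have hin : pvCf L[k] ∈ (L.take (i+1)).map pvCf := by
                  rw [hKsucc, heq]
                  exact List.mem_append.mpr (Or.inr (List.mem_singleton.mpr rfl))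
                have : (k < L.length ∧ k ≠ i ∧ (pvCf L[k] == pvCf s) = true) := by
                  refine ⟨hk, fun hkk => hik hkk.symm, beq_iff_eq.mpr heq⟩
                rw [if_pos this, if_pos hin]
              · have hnin : pvCf L[k] ∉ (L.take (i+1)).map pvCf := by
                  rw [hKsucc]
                  intro hmem
                  rcases List.mem_append.mp hmem with hmm | hmm
                  · exact hd hmm
                  · rw [List.mem_singleton] at hmm
                    exact heq hmm
                have hbf : (pvCf L[k] == pvCf s) = false := beq_eq_false_iff_ne.mpr heq
                rw [hbf]
                simp only [Bool.false_eq_true, and_false, if_false, hlhs, if_neg hd, if_neg hnin]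
        · have hlen1 : (inner.2.set i none).length = L.length := by
            rw [List.length_set, h2, pvMask_length]
          have hlen2 : (pvMask L (i+1)).length = L.length := pvMask_length L (i+1)
          rw [List.getElem?_eq_none (by omega), List.getElem?_eq_none (by omega)]
      rw [hsm, hmask]

theorem fms_eq (L : List String) :
    find_max_strong L = pvMsup ((L.map pvCf).map (fun c => pvCnt L c - 1)) := by
  unfold find_max_strong
  rw [outer_spec L L.length (le_refl _)]
  show pvMi L L.length = _
  unfold pvMi pvMsup
  rw [List.take_length]
  simp only [List.map_map, List.foldl_map, Function.comp_def]

-- get_max_min: monotonicity of the fold, then the min/max bounds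
theorem gm_mono (T : List String) (a : Option Int × Int) :
    a.2 ≤ (T.foldl (fun st s =>
      let l := PySem.Str.len s
      let mx := if st.2 < l then l else st.2
      let mn := match st.1 with
        | none => some l
        | some m => if l < m then some l else some m
      (mn, mx)) a).2
  ∧ ∀ m0, a.1 = some m0 → ∃ m, (T.foldl (fun st s =>
      let l := PySem.Str.len s
      let mx := if st.2 < l then l else st.2
      let mn := match st.1 with
        | none => some l
        | some m => if l < m then some l else some m
      (mn, mx)) a).1 = some m ∧ m ≤ m0 := by
  induction T generalizing a with
  | nil => exact ⟨le_refl _, fun m0 h => ⟨m0, h, le_refl _⟩⟩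
  | cons t T ih =>
    rw [List.foldl_cons]
    obtain ⟨mn, mx⟩ := a
    dsimp only
    constructor
    · refine le_trans ?_ (ih _).1
      dsimp only
      split <;> omega
    · intro m0 hm0
      have hm0' : mn = some m0 := hm0
      subst hm0'
      dsimp only
      by_cases hl : PySem.Str.len t < m0
      · rw [if_pos hl]
        obtain ⟨m, hm, hle⟩ := (ih (some (PySem.Str.len t),
          if mx < PySem.Str.len t then PySem.Str.len t else mx)).2 (PySem.Str.len t) rfl
        exact ⟨m, hm, le_trans hle (le_of_lt hl)⟩
      · rw [if_neg hl]
        obtain ⟨m, hm, hle⟩ := (ih (some m0,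
          if mx < PySem.Str.len t then PySem.Str.len t else mx)).2 m0 rfl
        exact ⟨m, hm, hle⟩

theorem gm_bound_aux (T : List String) (a : Option Int × Int) (s : String) (hs : s ∈ T) :
    (∃ m, (T.foldl (fun st s =>
      let l := PySem.Str.len s
      let mx := if st.2 < l then l else st.2
      let mn := match st.1 with
        | none => some l
        | some m => if l < m then some l else some m
      (mn, mx)) a).1 = some m ∧ m ≤ PySem.Str.len s)
  ∧ PySem.Str.len s ≤ (T.foldl (fun st s =>
      let l := PySem.Str.len s
      let mx := if st.2 < l then l else st.2
      let mn := match st.1 with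
        | none => some l
        | some m => if l < m then some l else some m
      (mn, mx)) a).2 := by
  induction T generalizing a with
  | nil => simp at hs
  | cons t T ih =>
    rw [List.foldl_cons]
    rcases List.mem_cons.mp hs with rfl | hmem
    · -- s is the head: the accumulator after one step brackets len s, and the rest is monotone
      obtain ⟨mn, mx⟩ := a
      dsimp only
      constructor
      · cases mn with
        | none =>
          dsimp only
          obtain ⟨m, hm, hle⟩ := (gm_mono T (some (PySem.Str.len s),
            if mx < PySem.Str.len s then PySem.Str.len s else mx)).2 (PySem.Str.len s) rfl
          exact ⟨m, hm, hle⟩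
        | some m' =>
          dsimp only
          by_cases hl : PySem.Str.len s < m'
          · rw [if_pos hl]
            obtain ⟨m, hm, hle⟩ := (gm_mono T (some (PySem.Str.len s),
              if mx < PySem.Str.len s then PySem.Str.len s else mx)).2 (PySem.Str.len s) rfl
            exact ⟨m, hm, hle⟩
          · rw [if_neg hl]
            obtain ⟨m, hm, hle⟩ := (gm_mono T (some m',
              if mx < PySem.Str.len s then PySem.Str.len s else mx)).2 m' rfl
            exact ⟨m, hm, le_trans hle (by omega)⟩
      · refine le_trans ?_ (gm_mono T _).1
        dsimp only
        split <;> omega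
    · exact ih _ hmem

theorem gm_bound (T : List String) (s : String) (hs : s ∈ T) :
    (∃ m, (get_max_min T).1 = some m ∧ m ≤ PySem.Str.len s)
  ∧ PySem.Str.len s ≤ (get_max_min T).2 :=
  gm_bound_aux T (none, 0) s hs

-- bucket filling: cell k of the bucket array collects the strings of length mn + k, in order
theorem build_spec (mn mx : Int) (T : List String)
    (hT : ∀ s ∈ T, mn ≤ PySem.Str.len s ∧ PySem.Str.len s ≤ mx)
    (B0 : List (List String)) (hB : B0.length = (mx - mn + 1).toNat) :
    (T.foldl (pvBStep mn) B0).length = B0.length ∧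
    ∀ k : Nat, (T.foldl (pvBStep mn) B0).getD k []
      = B0.getD k [] ++ T.filter (fun s => PySem.Str.len s == mn + (k : Int)) := by
  induction T generalizing B0 with
  | nil => exact ⟨rfl, by simp⟩
  | cons t T ih =>
    obtain ⟨hmn, hmx⟩ := hT t (List.mem_cons_self)
    have hT' : ∀ s ∈ T, mn ≤ PySem.Str.len s ∧ PySem.Str.len s ≤ mx :=
      fun s hsm => hT s (List.mem_cons_of_mem t hsm)
    rw [List.foldl_cons]
    have hlen : (pvBStep mn B0 t).length = B0.length := by
      unfold pvBStep
      exact List.length_set ..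
    obtain ⟨ihl, ihg⟩ := ih hT' (pvBStep mn B0 t) (by rw [hlen, hB])
    refine ⟨by rw [ihl, hlen], ?_⟩
    intro k
    rw [ihg k]
    have hidx : (PySem.Str.len t - mn).toNat < B0.length := by
      rw [hB]
      omega
    have hstepg : (pvBStep mn B0 t).getD k []
        = if (PySem.Str.len t - mn).toNat = k then B0.getD k [] ++ [t] else B0.getD k [] := by
      unfold pvBStep
      rw [List.getD_eq_getElem?_getD, List.getElem?_set]
      by_cases hk : (PySem.Str.len t - mn).toNat = k
      · rw [if_pos hk, if_pos hidx, if_pos hk, ← hk, List.getD_eq_getElem?_getD]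
        rfl
      · rw [if_neg hk, if_neg hk, List.getD_eq_getElem?_getD]
    rw [hstepg]
    by_cases hteq : PySem.Str.len t = mn + (k : Int)
    · have hk : (PySem.Str.len t - mn).toNat = k := by omega
      have hbe : (PySem.Str.len t == mn + (k : Int)) = true := beq_iff_eq.mpr hteq
      have hfp : List.filter (fun s => PySem.Str.len s == mn + (k : Int)) (t :: T)
          = t :: List.filter (fun s => PySem.Str.len s == mn + (k : Int)) T :=
        List.filter_cons_of_pos (by exact hbe)
      rw [if_pos hk, hfp, List.append_assoc, List.singleton_append]
    · have hk : ¬ (PySem.Str.len t - mn).toNat = k := by omega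
      have hbe : (PySem.Str.len t == mn + (k : Int)) = false := beq_eq_false_iff_ne.mpr hteq
      have hfn : List.filter (fun s => PySem.Str.len s == mn + (k : Int)) (t :: T)
          = List.filter (fun s => PySem.Str.len s == mn + (k : Int)) T :=
        List.filter_cons_of_neg (by
          intro hc
          simp at hc
          apply hteq
          rw [PySem.Str.len_eq]
          exact_mod_cast hc)
      rw [if_neg hk, hfn]

-- a canonical key's multiplicity inside its own length-bucket equals its multiplicity in T
theorem pvCnt_filter (T : List String) (q : Int) (t : String) (ht : PySem.Str.len t = q) :
    pvCnt (T.filter (fun s => PySem.Str.len s == q)) (pvCf t) = pvCnt T (pvCf t) := by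
  unfold pvCnt
  have h1 : ∀ (X : List String), ((X.map pvCf).count (pvCf t)) = X.countP (fun s => pvCf s == pvCf t) := by
    intro X
    simp [List.count_eq_countP, List.countP_map]
    rfl
  rw [h1, h1, List.countP_filter]
  congr 1
  apply List.countP_congr
  intro s _
  constructor
  · intro hand
    exact (Bool.and_eq_true _ _).mp hand |>.1
  · intro heq
    refine (Bool.and_eq_true _ _).mpr ⟨heq, ?_⟩
    have hcf : pvCf s = pvCf t := beq_iff_eq.mp heq
    have hls : s.length = t.length := by
      rw [← length_pvCf s, ← length_pvCf t, hcf]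
    apply beq_iff_eq.mpr
    rw [PySem.Str.len_eq] at ht ⊢
    have hst := @String.length_toList s
    have htt := @String.length_toList t
    omega

-- A on nonempty input computes the maximal (canonical-class size - 1), plus 1
theorem bucket_eq (T : List String) (hT : T ≠ []) :
    bucket T = pvMsup ((T.map pvCf).map (fun c => pvCnt T c - 1)) + 1 := by
  obtain ⟨t0, ht0⟩ : ∃ t0, t0 ∈ T := ⟨T.head hT, List.head_mem hT⟩
  obtain ⟨⟨mn, hmn, hmnle0⟩, _⟩ := gm_bound T t0 ht0
  have hbounds : ∀ s ∈ T, mn ≤ PySem.Str.len s ∧ PySem.Str.len s ≤ (get_max_min T).2 := by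
    intro s hs
    obtain ⟨⟨m, hm, hle⟩, hle2⟩ := gm_bound T s hs
    rw [hmn] at hm
    have hmm : mn = m := Option.some.inj hm
    exact ⟨hmm ▸ hle, hle2⟩
  have hN0 : 0 < ((get_max_min T).2 - mn + 1).toNat := by
    obtain ⟨hb1, hb2⟩ := hbounds t0 ht0
    omega
  have hB0len : (List.replicate ((get_max_min T).2 - mn + 1).toNat ([] : List String)).length
      = ((get_max_min T).2 - mn + 1).toNat := List.length_replicate ..
  obtain ⟨hflen, hfget⟩ := build_spec mn ((get_max_min T).2) T hbounds _ hB0len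
  show (match (get_max_min T).1 with
    | none => (0 : Int)
    | some mn =>
      let diff := (get_max_min T).2 - mn
      let B0 : List (List String) := List.replicate (diff + 1).toNat []
      let B := T.foldl (pvBStep mn) B0
      let ms := B.foldl (fun ms b =>
        let compare := find_max_strong b
        if ms < compare then compare else ms) 0
      ms + 1)
    = pvMsup ((T.map pvCf).map (fun c => pvCnt T c - 1)) + 1
  rw [hmn]
  dsimp only
  congr 1
  have hstep : (fun (ms : Int) (b : List String) =>
      let compare := find_max_strong b
      if ms < compare then compare else ms) = fun ms b => max ms (find_max_strong b) := by
    funext ms b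
    dsimp only
    omega
  rw [hstep, ← List.foldl_map (f := find_max_strong) (g := max)]
  have hBf : T.foldl (pvBStep mn) (List.replicate ((get_max_min T).2 - mn + 1).toNat [])
      = (List.range ((get_max_min T).2 - mn + 1).toNat).map
          (fun (k : Nat) => T.filter (fun s => PySem.Str.len s == mn + (k : Int))) := by
    apply List.ext_getElem?
    intro k
    by_cases hk : k < ((get_max_min T).2 - mn + 1).toNat
    · have hkb : k < (T.foldl (pvBStep mn)
          (List.replicate ((get_max_min T).2 - mn + 1).toNat [])).length := by
        rw [hflen, hB0len]
        exact hk
      rw [List.getElem?_eq_getElem hkb, List.getElem?_map, List.getElem?_range hk]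
      have hgd : (T.foldl (pvBStep mn) (List.replicate ((get_max_min T).2 - mn + 1).toNat []))[k]
          = (T.foldl (pvBStep mn) (List.replicate ((get_max_min T).2 - mn + 1).toNat [])).getD k [] := by
        rw [List.getD_eq_getElem?_getD, List.getElem?_eq_getElem hkb]
        rfl
      rw [hgd, hfget k]
      have hrep : (List.replicate ((get_max_min T).2 - mn + 1).toNat ([] : List String)).getD k [] = [] := by
        rw [List.getD_eq_getElem?_getD, List.getElem?_replicate]
        split <;> rfl
      rw [hrep, List.nil_append]
      rfl
    · have hkb : ¬ k < (T.foldl (pvBStep mn)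
          (List.replicate ((get_max_min T).2 - mn + 1).toNat [])).length := by
        rw [hflen, hB0len]
        exact hk
      rw [List.getElem?_eq_none (by omega), List.getElem?_eq_none (by simp; omega)]
  rw [hBf, List.map_map]
  have hmapc : ((List.range ((get_max_min T).2 - mn + 1).toNat).map
        (find_max_strong ∘ fun (k : Nat) => T.filter (fun s => PySem.Str.len s == mn + (k : Int))))
      = (List.range ((get_max_min T).2 - mn + 1).toNat).map
        (fun (k : Nat) => pvMsup (((T.filter (fun s => PySem.Str.len s == mn + (k : Int))).map pvCf).map
          (fun c => pvCnt (T.filter (fun s => PySem.Str.len s == mn + (k : Int))) c - 1))) := by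
    apply List.map_congr_left
    intro k _
    exact fms_eq _
  rw [hmapc]
  apply le_antisymm
  · apply pvMsup_le (pvMsup_nonneg _)
    intro x hx
    obtain ⟨k, _, rfl⟩ := List.mem_map.mp hx
    apply pvMsup_le (pvMsup_nonneg _)
    intro y hy
    obtain ⟨c, hcmem, rfl⟩ := List.mem_map.mp hy
    obtain ⟨t, htmem, rfl⟩ := List.mem_map.mp hcmem
    have htT : t ∈ T := List.mem_of_mem_filter htmem
    have hlen : PySem.Str.len t = mn + (k : Int) := beq_iff_eq.mp (List.mem_filter.mp htmem).2
    rw [pvCnt_filter T (mn + (k : Int)) t hlen]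
    apply le_pvMsup
    exact List.mem_map.mpr ⟨pvCf t, List.mem_map.mpr ⟨t, htT, rfl⟩, rfl⟩
  · apply pvMsup_le (pvMsup_nonneg _)
    intro x hx
    obtain ⟨c, hcmem, rfl⟩ := List.mem_map.mp hx
    obtain ⟨t, htT, rfl⟩ := List.mem_map.mp hcmem
    obtain ⟨hmnle, hmxle⟩ := hbounds t htT
    have hkN : (PySem.Str.len t - mn).toNat < ((get_max_min T).2 - mn + 1).toNat := by omega
    have hlen : PySem.Str.len t = mn + (((PySem.Str.len t - mn).toNat : Nat) : Int) := by omega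
    have htf : t ∈ T.filter (fun s => PySem.Str.len s == mn + (((PySem.Str.len t - mn).toNat : Nat) : Int)) :=
      List.mem_filter.mpr ⟨htT, beq_iff_eq.mpr hlen⟩
    refine le_trans ?_ (le_pvMsup
      (List.mem_map.mpr ⟨(PySem.Str.len t - mn).toNat, List.mem_range.mpr hkN, rfl⟩))
    rw [← pvCnt_filter T (mn + (((PySem.Str.len t - mn).toNat : Nat) : Int)) t hlen]
    apply le_pvMsup
    exact List.mem_map.mpr ⟨pvCf t, List.mem_map.mpr ⟨t, htf, rfl⟩, rfl⟩

-- B computes the maximal canonical-class size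
theorem slice_rev (s : String) : PySem.Str.slice? s none none (-1) = some (pvRev s) := by
  simp [PySem.Str.slice?, PySem.List.slice?_none_none_neg_one, pvRev]

theorem bucket_alt_eq (T : List String) (hT : T ≠ []) :
    bucket_alt T = pvMsup ((T.map pvCf).map (fun c => pvCnt T c)) := by
  have hstepf : (fun (d : PySem.Dict String Int) s =>
      let r := (PySem.Str.slice? s none none (-1)).getD s
      let k := if s.toList ≤ r.toList then s else r
      d.insert k (d.getD k 0 + 1))
    = fun (d : PySem.Dict String Int) s => d.insert (pvCf s) (d.getD (pvCf s) 0 + 1) := by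
    funext d s
    dsimp only
    have hr : (PySem.Str.slice? s none none (-1)).getD s = pvRev s := by
      rw [slice_rev s]
      rfl
    rw [hr, toList_pvRev]
    rfl
  show (match PySem.List.max? ((T.foldl (fun (d : PySem.Dict String Int) s =>
      let r := (PySem.Str.slice? s none none (-1)).getD s
      let k := if s.toList ≤ r.toList then s else r
      d.insert k (d.getD k 0 + 1)) PySem.Dict.empty).values) (fun v => v) with
    | none => (0 : Int)
    | some v => v) = pvMsup ((T.map pvCf).map (fun c => pvCnt T c))
  rw [hstepf,
    ← List.foldl_map (f := pvCf) (g := fun (d : PySem.Dict String Int) k => d.insert k (d.getD k 0 + 1)),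
    PySem.Dict.foldl_insert_getD_add_one_eq_counter,
    PySem.Dict.values_eq_map_keys _ (PySem.Dict.nodup_keys_counter _) 0,
    PySem.Dict.keys_counter]
  have hgd : (PySem.Set.ofList (T.map pvCf)).map (fun c => (PySem.Dict.counter (T.map pvCf)).getD c 0)
      = (PySem.Set.ofList (T.map pvCf)).map (fun c => (((T.map pvCf).count c : Nat) : Int)) := by
    apply List.map_congr_left
    intro c _
    exact PySem.Dict.getD_counter (T.map pvCf) c
  rw [hgd]
  have hclne : T.map pvCf ≠ [] := fun h => hT (List.map_eq_nil_iff.mp h)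
  have hone : ∀ x ∈ (PySem.Set.ofList (T.map pvCf)).map (fun c => (((T.map pvCf).count c : Nat) : Int)),
      1 ≤ x := by
    intro x hx
    obtain ⟨c, hc, rfl⟩ := List.mem_map.mp hx
    have hcm : c ∈ T.map pvCf := (PySem.Set.mem_ofList _ _).mp hc
    have := List.count_pos_iff.mpr hcm
    omega
  cases hv : (PySem.Set.ofList (T.map pvCf)).map (fun c => (((T.map pvCf).count c : Nat) : Int)) with
  | nil =>
    exfalso
    obtain ⟨c0, hc0⟩ : ∃ c0, c0 ∈ T.map pvCf := by
      cases hcl : T.map pvCf with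
      | nil => exact absurd hcl hclne
      | cons a l => exact ⟨a, List.mem_cons_self⟩
    have : (((T.map pvCf).count c0 : Nat) : Int)
        ∈ (PySem.Set.ofList (T.map pvCf)).map (fun c => (((T.map pvCf).count c : Nat) : Int)) :=
      List.mem_map.mpr ⟨c0, (PySem.Set.mem_ofList _ _).mpr hc0, rfl⟩
    rw [hv] at this
    simp at this
  | cons v vs =>
    rw [hv] at hone
    rw [PySem.List.max?_id_cons]
    show vs.foldl max v = _
    have hv1 : 1 ≤ v := hone v List.mem_cons_self
    have hfold : vs.foldl max v = pvMsup (v :: vs) := by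
      unfold pvMsup
      rw [List.foldl_cons]
      have : max 0 v = v := by omega
      rw [this]
    rw [hfold]
    apply le_antisymm
    · apply pvMsup_le (pvMsup_nonneg _)
      intro x hx
      rw [← hv] at hx
      obtain ⟨c, hc, rfl⟩ := List.mem_map.mp hx
      have hcm : c ∈ T.map pvCf := (PySem.Set.mem_ofList _ _).mp hc
      apply le_pvMsup
      exact List.mem_map.mpr ⟨c, hcm, rfl⟩
    · apply pvMsup_le (pvMsup_nonneg _)
      intro x hx
      obtain ⟨c, hcm, rfl⟩ := List.mem_map.mp hx
      apply le_pvMsup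
      rw [← hv]
      exact List.mem_map.mpr ⟨c, (PySem.Set.mem_ofList _ _).mpr hcm, rfl⟩

theorem shift_one (T : List String) (hT : T ≠ []) :
    pvMsup ((T.map pvCf).map (fun c => pvCnt T c - 1)) + 1
      = pvMsup ((T.map pvCf).map (fun c => pvCnt T c)) := by
  have hone : ∀ c ∈ T.map pvCf, 1 ≤ pvCnt T c := by
    intro c hc
    unfold pvCnt
    have := List.count_pos_iff.mpr hc
    omega
  obtain ⟨c0, hc0⟩ : ∃ c0, c0 ∈ T.map pvCf := by
    cases hcl : T.map pvCf with
    | nil => exact absurd hcl (fun h => hT (List.map_eq_nil_iff.mp h))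
    | cons a l => exact ⟨a, List.mem_cons_self⟩
  have hB1 : 1 ≤ pvMsup ((T.map pvCf).map (fun c => pvCnt T c)) :=
    le_trans (hone c0 hc0) (le_pvMsup (List.mem_map.mpr ⟨c0, hc0, rfl⟩))
  have hA0 : 0 ≤ pvMsup ((T.map pvCf).map (fun c => pvCnt T c - 1)) := pvMsup_nonneg _
  have h1 : pvMsup ((T.map pvCf).map (fun c => pvCnt T c - 1))
      ≤ pvMsup ((T.map pvCf).map (fun c => pvCnt T c)) - 1 := by
    apply pvMsup_le (by omega)
    intro x hx
    obtain ⟨c, hc, rfl⟩ := List.mem_map.mp hx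
    have := le_pvMsup (List.mem_map.mpr ⟨c, hc, rfl⟩ :
      pvCnt T c ∈ (T.map pvCf).map (fun c => pvCnt T c))
    omega
  have h2 : pvMsup ((T.map pvCf).map (fun c => pvCnt T c))
      ≤ pvMsup ((T.map pvCf).map (fun c => pvCnt T c - 1)) + 1 := by
    apply pvMsup_le (by omega)
    intro x hx
    obtain ⟨c, hc, rfl⟩ := List.mem_map.mp hx
    have := le_pvMsup (List.mem_map.mpr ⟨c, hc, rfl⟩ :
      pvCnt T c - 1 ∈ (T.map pvCf).map (fun c => pvCnt T c - 1))
    omega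
  omega

-- ===== VERDICT (by name: the statement is the Claim_ definition above) =====
theorem bucket_spec : Claim_equal_bucket := by
  intro T _ hpre
  unfold Spec_bucket
  rw [bucket_eq T hpre, bucket_alt_eq T hpre, shift_one T hpre]
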